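-- pv_equiv track=rewrite | github.com/happymaurya/DSA | 3740-minimum-distance-between-three-equal-elements-i/3740-minimum-distance-between-three-equal-elements-i.py | minimumDistance
-- ===== SOURCE A (Python) =====
-- from collections import defaultdict
--
-- def minimumDistance(nums):
--     mp = defaultdict(list)
--
--     # Step 1: store indices
--     for i, num in enumerate(nums):
--         mp[num].append(i)
--
--     ans = float('inf')
--
--     # Step 2: process each value
--     for indices in mp.values():
--         if len(indices) >= 3:
--             # Step 3: check consecutive triples
--             for i in range(len(indices) - 2):
--                 dist = 2 * (indices[i + 2] - indices[i])
--                 ans = min(ans, dist)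
--
--     return ans if ans != float('inf') else -1
-- ===== SOURCE B (Python) =====
-- def minimumDistance(nums):
--     last = {}
--     best = -1
--     for i, num in enumerate(nums):
--         pair = last.get(num)
--         if pair is None:
--             last[num] = [i]
--         elif len(pair) == 1:
--             last[num] = pair + [i]
--         else:
--             d = 2 * (i - pair[0])
--             if best == -1 or d < best:
--                 best = d
--             last[num] = [pair[1], i]
--     return best
-- ===== Notes on version B (the rewrite author's own statement) =====
-- stated objective: alternative
-- what changed: Replaces A's two-phase approach (build full per-value index lists in a dict, then a second pass scanning every consecutive triple of each list) by a single pass over nums that keeps only the last two indices per value and updates a running minimum with a -1 sentinel when a value recurs a third time.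
import Mathlib
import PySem

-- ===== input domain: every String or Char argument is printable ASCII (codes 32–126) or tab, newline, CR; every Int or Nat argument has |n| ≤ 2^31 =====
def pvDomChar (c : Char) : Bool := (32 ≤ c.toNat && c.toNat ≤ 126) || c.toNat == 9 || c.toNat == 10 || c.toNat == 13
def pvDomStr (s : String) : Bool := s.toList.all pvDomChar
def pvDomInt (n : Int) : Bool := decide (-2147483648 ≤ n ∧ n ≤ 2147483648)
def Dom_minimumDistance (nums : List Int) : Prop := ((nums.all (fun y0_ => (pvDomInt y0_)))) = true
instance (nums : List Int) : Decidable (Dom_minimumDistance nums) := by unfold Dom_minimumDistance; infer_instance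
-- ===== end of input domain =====

-- B replaces A's two-pass build-all-index-lists-then-scan-windows by a single pass keeping only the
-- last two indices per value (objective: alternative — same O(n) cost, bounded per-value state).

-- ===== PORT A =====
def minimumDistance (nums : List Int) : Int :=
  -- mp[num].append(i) over enumerate(nums); defaultdict(list) = modify with default []
  let mp : PySem.Dict Int (List Int) :=
    (PySem.List.enumerate nums).foldl
      (fun d p => d.modify p.2 [] (fun l => l ++ [p.1])) PySem.Dict.empty
  -- ans = float('inf') modelled as `none`; min(ans, dist) with a finite dist is always finite
  let ans : Option Int :=
    mp.values.foldl
      (fun ans indices =>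
        if 3 ≤ indices.length then
          (List.range (indices.length - 2)).foldl
            (fun ans i =>
              let dist : Int := 2 * (indices.getD (i + 2) 0 - indices.getD i 0)
              some (match ans with | none => dist | some v => min v dist)) ans
        else ans) none
  match ans with | none => -1 | some v => v

-- ===== PORT B =====
-- one step of B's single pass: p = (i, num)
def bstep (st : PySem.Dict Int (List Int) × Int) (p : Int × Int) :
    PySem.Dict Int (List Int) × Int :=
  match st.1.get? p.2 with
  | none => (st.1.insert p.2 [p.1], st.2)
  | some pair =>
    if pair.length == 1 then (st.1.insert p.2 (pair ++ [p.1]), st.2)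
    else
      let d : Int := 2 * (p.1 - pair.getD 0 0)
      (st.1.insert p.2 [pair.getD 1 0, p.1],
       if st.2 = -1 ∨ d < st.2 then d else st.2)

def minimumDistance_alt (nums : List Int) : Int :=
  ((PySem.List.enumerate nums).foldl bstep ((PySem.Dict.empty : PySem.Dict Int (List Int)), (-1 : Int))).2

-- ===== PRECONDITION & SPEC =====
def Spec_minimumDistance (nums : List Int) (out : Int) : Prop := out = minimumDistance_alt nums
instance (nums : List Int) (out : Int) : Decidable (Spec_minimumDistance nums out) := by unfold Spec_minimumDistance; infer_instance

-- ===== CLAIM (what is proved, stated in full; the proofs are below) =====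
def Claim_equal_minimumDistance : Prop := ∀ (nums : List Int), Dom_minimumDistance nums → Spec_minimumDistance nums (minimumDistance nums)

-- ===== LEMMAS AND PROOFS =====

-- the common reference value: the min (as Option Int, none = no candidate) over all windows
def omin (a : Option Int) (d : Int) : Option Int :=
  some (match a with | none => d | some v => min v d)

-- indices of occurrences of v in nums, in order
def occF (v : Int) (nums : List Int) : List Int :=
  (((PySem.List.enumerate nums).map Prod.swap).filter (fun p => p.1 == v)).map (·.2)

-- A's candidate distances for one occurrence list
def winF (l : List Int) : List Int :=
  (List.range (l.length - 2)).map (fun i => 2 * (l.getD (i + 2) 0 - l.getD i 0))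

def ansAF (nums : List Int) : Option Int :=
  ((PySem.Set.ofList nums).flatMap (fun v => winF (occF v nums))).foldl omin none

def toSent : Option Int → Int
  | none => -1
  | some v => v

-- the last ≤2 occurrence indices B stores for a value
def lastTwo (l : List Int) : Option (List Int) :=
  if l = [] then none
  else if l.length = 1 then some l
  else some [l.getD (l.length - 2) 0, l.getD (l.length - 1) 0]

theorem omin_swap (a : Option Int) (c h : Int) : omin (omin a c) h = omin (omin a h) c := by
  cases a <;> simp [omin] <;> omega

theorem foldl_omin_omin (l : List Int) (a : Option Int) (c : Int) :
    l.foldl omin (omin a c) = omin (l.foldl omin a) c := by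
  induction l generalizing a with
  | nil => rfl
  | cons x t ih => simp only [List.foldl_cons, omin_swap a c x, ih]

theorem foldl_omin_flatMap {α : Type} (l : List α) (g : α → List Int) (a : Option Int) :
    l.foldl (fun a v => (g v).foldl omin a) a = (l.flatMap g).foldl omin a := by
  induction l generalizing a with
  | nil => rfl
  | cons x t ih => simp only [List.foldl_cons, List.flatMap_cons, List.foldl_append, ih]

-- A's inner per-value step, named (definitionally equal to the port's lambda)
def aStep (ans : Option Int) (indices : List Int) : Option Int :=
  if 3 ≤ indices.length then
    (List.range (indices.length - 2)).foldl
      (fun ans i => omin ans (2 * (indices.getD (i + 2) 0 - indices.getD i 0))) ans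
  else ans

theorem aStep_eq (a : Option Int) (idx : List Int) : aStep a idx = (winF idx).foldl omin a := by
  unfold aStep
  by_cases h3 : 3 ≤ idx.length
  · rw [if_pos h3]
    unfold winF
    rw [List.foldl_map]
  · rw [if_neg h3]
    have h0 : idx.length - 2 = 0 := by omega
    simp [winF, h0]

theorem A_closed (nums : List Int) : minimumDistance nums = toSent (ansAF nums) := by
  have h1 : minimumDistance nums =
      toSent (((PySem.List.enumerate nums).foldl
          (fun d p => d.modify p.2 [] (fun l => l ++ [p.1]))
          (PySem.Dict.empty : PySem.Dict Int (List Int))).values.foldl aStep none) := rfl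
  rw [h1]
  have hfold :
      (PySem.List.enumerate nums).foldl (fun d p => d.modify p.2 [] (fun l => l ++ [p.1]))
        (PySem.Dict.empty : PySem.Dict Int (List Int))
      = ((PySem.List.enumerate nums).map Prod.swap).foldl
          (fun d p => d.modify p.1 [] (fun l => l ++ [p.2])) PySem.Dict.empty := by
    rw [List.foldl_map]; rfl
  rw [hfold]
  set E := (PySem.List.enumerate nums).map Prod.swap with hE
  set mp := E.foldl (fun d p => d.modify p.1 [] (fun l => l ++ [p.2]))
      (PySem.Dict.empty : PySem.Dict Int (List Int)) with hmp
  have hget : ∀ c, mp.getD c [] = occF c nums := by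
    intro c
    rw [hmp, PySem.Dict.getD_foldl_modify_append, PySem.Dict.getD_empty, List.nil_append]
    rfl
  have hkeys : mp.keys = PySem.Set.ofList nums := by
    rw [hmp]
    rw [PySem.Dict.keys_foldl_modify_key E Prod.fst [] (fun _ p l => l ++ [p.2]) PySem.Dict.empty]
    rw [PySem.Dict.keys_empty, hE, List.map_map]
    have : (Prod.fst ∘ Prod.swap : Int × Int → Int) = Prod.snd := rfl
    rw [this, PySem.List.map_snd_enumerate, PySem.Set.update_nil_left]
  have hnodup : mp.keys.Nodup := by rw [hkeys]; exact PySem.Set.nodup_ofList nums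
  rw [PySem.Dict.values_eq_map_keys mp hnodup [], List.foldl_map]
  have hcongr : mp.keys.foldl (fun a k => aStep a (mp.getD k [])) none
      = mp.keys.foldl (fun (a : Option Int) (k : Int) => (winF (occF k nums)).foldl omin a) none := by
    apply PySem.List.foldl_congr_mem
    intro acc k _
    rw [hget k, aStep_eq]
  rw [hcongr, hkeys, foldl_omin_flatMap, ← ansAF]

theorem occF_append (v : Int) (ys : List Int) (x : Int) :
    occF v (ys ++ [x]) = occF v ys ++ (if x = v then [(ys.length : Int)] else []) := by
  unfold occF
  rw [PySem.List.enumerate_append]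
  simp [PySem.List.enumerate_cons, PySem.List.enumerate_nil, List.filter_append]
  split_ifs with h <;> simp [h]

theorem occF_lt (v i : Int) (ys : List Int) (h : i ∈ occF v ys) : 0 ≤ i ∧ i < (ys.length : Int) := by
  unfold occF at h
  simp only [List.mem_map, List.mem_filter] at h
  obtain ⟨p, ⟨⟨q, hq, hqp⟩, -⟩, hpi⟩ := h
  rw [PySem.List.mem_enumerate_iff] at hq
  obtain ⟨k, hk, rfl⟩ := hq
  subst hqp hpi
  simp
  omega

theorem occF_nil_of_not_mem (v : Int) (ys : List Int) (h : v ∉ ys) : occF v ys = [] := by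
  unfold occF
  rw [List.filter_eq_nil_iff.mpr, List.map_nil]
  intro p hp
  simp only [List.mem_map] at hp
  obtain ⟨q, hq, rfl⟩ := hp
  rw [PySem.List.mem_enumerate_iff] at hq
  obtain ⟨k, hk, rfl⟩ := hq
  simp only [Prod.swap_prod_mk, beq_iff_eq]
  intro hvv
  exact h (hvv ▸ List.getElem_mem hk)

theorem winF_append (l : List Int) (n : Int) :
    winF (l ++ [n]) = winF l ++ (if 2 ≤ l.length then [2 * (n - l.getD (l.length - 2) 0)] else []) := by
  unfold winF
  by_cases h2 : 2 ≤ l.length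
  · rw [if_pos h2]
    have hlen : l.length + 1 - 2 = (l.length - 2) + 1 := by omega
    rw [List.length_append, List.length_singleton, hlen, List.range_succ, List.map_append]
    congr 1
    · apply List.map_congr_left
      intro i hi
      rw [List.mem_range] at hi
      rw [List.getD_append _ _ _ _ (by omega), List.getD_append _ _ _ _ (by omega)]
    · simp only [List.map_cons, List.map_nil]
      have e1 : (l ++ [n]).getD (l.length - 2 + 2) 0 = n := by
        rw [List.getD_append_right _ _ _ _ (by omega)]
        have h0 : l.length - 2 + 2 - l.length = 0 := by omega
        rw [h0]; rfl
      have e2 : (l ++ [n]).getD (l.length - 2) 0 = l.getD (l.length - 2) 0 :=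
        List.getD_append _ _ _ _ (by omega)
      rw [e1, e2]
  · rw [if_neg h2]
    have : l.length + 1 - 2 = 0 := by omega
    have h0 : l.length - 2 = 0 := by omega
    rw [List.length_append, List.length_singleton, this, h0]
    simp

theorem ansAF_append (ys : List Int) (x : Int) :
    ansAF (ys ++ [x]) =
      if 2 ≤ (occF x ys).length then
        omin (ansAF ys) (2 * ((ys.length : Int) - (occF x ys).getD ((occF x ys).length - 2) 0))
      else ansAF ys := by
  unfold ansAF
  rw [PySem.Set.ofList_append, PySem.Set.update_cons, PySem.Set.update_nil]
  by_cases hx : x ∈ ys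
  · -- x already occurs: the value set is unchanged, x's window list may grow by one
    have hadd : (PySem.Set.ofList ys).add x = PySem.Set.ofList ys := by
      unfold PySem.Set.add
      rw [if_pos]
      simp [PySem.Set.contains, PySem.Set.mem_ofList, hx]
    rw [hadd]
    have hmem : x ∈ PySem.Set.ofList ys := (PySem.Set.mem_ofList ys x).mpr hx
    obtain ⟨L, R, hS⟩ := List.append_of_mem hmem
    have hnd : (PySem.Set.ofList ys).Nodup := PySem.Set.nodup_ofList ys
    rw [hS] at hnd
    rw [List.nodup_middle, List.nodup_cons, List.mem_append] at hnd
    have hxL : x ∉ L := fun h => hnd.1 (Or.inl h)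
    have hxR : x ∉ R := fun h => hnd.1 (Or.inr h)
    have hLsame : L.flatMap (fun v => winF (occF v (ys ++ [x]))) = L.flatMap (fun v => winF (occF v ys)) := by
      apply List.flatMap_congr
      intro v hv
      rw [occF_append, if_neg (by rintro rfl; exact hxL hv), List.append_nil]
    have hRsame : R.flatMap (fun v => winF (occF v (ys ++ [x]))) = R.flatMap (fun v => winF (occF v ys)) := by
      apply List.flatMap_congr
      intro v hv
      rw [occF_append, if_neg (by rintro rfl; exact hxR hv), List.append_nil]
    have hxocc : occF x (ys ++ [x]) = occF x ys ++ [(ys.length : Int)] := by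
      rw [occF_append, if_pos rfl]
    rw [hS]
    simp only [List.flatMap_append, List.flatMap_cons, hLsame, hRsame, hxocc, winF_append]
    by_cases h2 : 2 ≤ (occF x ys).length
    · rw [if_pos h2, if_pos h2]
      simp only [List.foldl_append]
      rw [List.foldl_cons, List.foldl_nil, foldl_omin_omin]
    · rw [if_neg h2, if_neg h2]
      simp
  · -- x is new: its occurrence list was empty, no new window
    have hadd : (PySem.Set.ofList ys).add x = PySem.Set.ofList ys ++ [x] := by
      unfold PySem.Set.add
      rw [if_neg]
      simp [PySem.Set.contains, PySem.Set.mem_ofList, hx]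
    have hnil : occF x ys = [] := occF_nil_of_not_mem x ys hx
    rw [hadd, hnil]
    simp only [List.length_nil]
    rw [if_neg (by omega)]
    have hsame : (PySem.Set.ofList ys).flatMap (fun v => winF (occF v (ys ++ [x])))
        = (PySem.Set.ofList ys).flatMap (fun v => winF (occF v ys)) := by
      apply List.flatMap_congr
      intro v hv
      rw [occF_append, if_neg (by rintro rfl; exact hx ((PySem.Set.mem_ofList ys x).mp hv)),
        List.append_nil]
    have hwx : winF (occF x (ys ++ [x])) = [] := by
      rw [occF_append, if_pos rfl, hnil, List.nil_append]
      rfl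
    rw [List.flatMap_append, hsame, List.flatMap_cons, hwx]
    simp

theorem ansAF_pos (ys : List Int) (m : Int) (h : ansAF ys = some m) : 0 < m := by
  induction ys using List.reverseRecOn generalizing m with
  | nil =>
    have h0 : ansAF [] = none := rfl
    rw [h0] at h
    cases h
  | append_singleton ys x ih =>
    rw [ansAF_append] at h
    by_cases h2 : 2 ≤ (occF x ys).length
    · rw [if_pos h2] at h
      have hp : (occF x ys).getD ((occF x ys).length - 2) 0 ∈ occF x ys := by
        rw [List.getD_eq_getElem _ _ (by omega)]
        exact List.getElem_mem _
      have hlt := occF_lt x _ ys hp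
      have hc : 0 < 2 * ((ys.length : Int) - (occF x ys).getD ((occF x ys).length - 2) 0) := by
        omega
      cases ha : ansAF ys with
      | none => rw [ha] at h; simp only [omin, Option.some.injEq] at h; omega
      | some v =>
        rw [ha] at h
        simp only [omin, Option.some.injEq] at h
        have := ih v ha
        omega
    · rw [if_neg h2] at h
      exact ih m h

theorem B_inv (ys : List Int) :
    (∀ v, ((PySem.List.enumerate ys).foldl bstep ((PySem.Dict.empty : PySem.Dict Int (List Int)), (-1 : Int))).1.get? v
        = lastTwo (occF v ys)) ∧
    ((PySem.List.enumerate ys).foldl bstep ((PySem.Dict.empty : PySem.Dict Int (List Int)), (-1 : Int))).2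
        = toSent (ansAF ys) := by
  induction ys using List.reverseRecOn with
  | nil =>
    refine ⟨fun v => ?_, rfl⟩
    have hocc : occF v ([] : List Int) = [] := rfl
    rw [hocc]
    rfl
  | append_singleton ys x ih =>
    obtain ⟨h1, h2⟩ := ih
    have hsplit : (PySem.List.enumerate (ys ++ [x])).foldl bstep
        ((PySem.Dict.empty : PySem.Dict Int (List Int)), (-1 : Int))
        = bstep ((PySem.List.enumerate ys).foldl bstep
            ((PySem.Dict.empty : PySem.Dict Int (List Int)), (-1 : Int))) ((ys.length : Int), x) := by
      rw [PySem.List.enumerate_append, List.foldl_append]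
      simp [PySem.List.enumerate_cons, PySem.List.enumerate_nil]
    rw [hsplit]
    set st := (PySem.List.enumerate ys).foldl bstep
        ((PySem.Dict.empty : PySem.Dict Int (List Int)), (-1 : Int)) with hst
    set n : Int := (ys.length : Int) with hn
    set l := occF x ys with hl
    have hxself : occF x (ys ++ [x]) = l ++ [n] := by
      rw [hl, hn, occF_append, if_pos rfl]
    have hother : ∀ v, v ≠ x → occF v (ys ++ [x]) = occF v ys := by
      intro v hv
      rw [occF_append, if_neg (fun h => hv h.symm), List.append_nil]
    rcases Nat.lt_or_ge l.length 2 with hlen | hlen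
    · -- fewer than two prior occurrences: no candidate, best unchanged
      have hans : ansAF (ys ++ [x]) = ansAF ys := by
        rw [ansAF_append, ← hl, if_neg (by omega)]
      interval_cases hc : l.length
      · -- l = []
        have hle : l = [] := List.length_eq_zero_iff.mp hc
        have hg : st.1.get? x = none := by rw [h1 x, ← hl, hle]; rfl
        have hb : bstep st (n, x) = (st.1.insert x [n], st.2) := by
          unfold bstep; rw [hg]
        rw [hb]
        refine ⟨fun v => ?_, by rw [h2, hans]⟩
        by_cases hv : v = x
        · subst hv
          rw [PySem.Dict.get?_insert_self, hxself, hle, List.nil_append]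
          simp [lastTwo]
        · rw [PySem.Dict.get?_insert_of_ne _ _ hv, h1 v, hother v hv]
      · -- l = [a]
        obtain ⟨a, ha⟩ := List.length_eq_one_iff.mp hc
        have hg : st.1.get? x = some [a] := by rw [h1 x, ← hl, ha]; rfl
        have hb : bstep st (n, x) = (st.1.insert x ([a] ++ [n]), st.2) := by
          unfold bstep; rw [hg]; rfl
        rw [hb]
        refine ⟨fun v => ?_, by rw [h2, hans]⟩
        by_cases hv : v = x
        · subst hv
          rw [PySem.Dict.get?_insert_self, hxself, ha]
          simp [lastTwo]
        · rw [PySem.Dict.get?_insert_of_ne _ _ hv, h1 v, hother v hv]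
    · -- two or more prior occurrences: a candidate is emitted
      set p := l.getD (l.length - 2) 0 with hp
      set q := l.getD (l.length - 1) 0 with hq
      have hlt : lastTwo l = some [p, q] := by
        unfold lastTwo
        rw [if_neg (by intro h; rw [h] at hlen; simp at hlen), if_neg (by omega)]
      have hg : st.1.get? x = some [p, q] := by rw [h1 x, ← hl, hlt]
      have hb : bstep st (n, x) = (st.1.insert x [q, n],
          if st.2 = -1 ∨ 2 * (n - p) < st.2 then 2 * (n - p) else st.2) := by
        unfold bstep; rw [hg]; rfl
      rw [hb]
      have hans : ansAF (ys ++ [x]) = omin (ansAF ys) (2 * (n - p)) := by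
        rw [ansAF_append, ← hl, ← hn, if_pos hlen, ← hp]
      constructor
      · intro v
        by_cases hv : v = x
        · subst hv
          rw [PySem.Dict.get?_insert_self, hxself]
          unfold lastTwo
          rw [if_neg (by simp),
            if_neg (by intro hcon; rw [List.length_append, List.length_singleton] at hcon; omega)]
          have e1 : (l ++ [n]).length - 2 = l.length - 1 := by
            rw [List.length_append, List.length_singleton]; omega
          have e2 : (l ++ [n]).length - 1 = l.length := by
            rw [List.length_append, List.length_singleton]; omega
          rw [e1, e2]
          rw [List.getD_append _ _ _ _ (by omega), ← hq]
          rw [List.getD_append_right _ _ _ _ (by omega)]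
          simp
        · rw [PySem.Dict.get?_insert_of_ne _ _ hv, h1 v, hother v hv]
      · -- the best value
        have hppos : 0 ≤ p ∧ p < n := by
          have hpm : p ∈ l := by
            rw [hp, List.getD_eq_getElem _ _ (by omega)]
            exact List.getElem_mem _
          rw [hl] at hpm
          exact occF_lt x p ys hpm
        rw [hans, h2]
        cases ha : ansAF ys with
        | none => simp [omin, toSent]
        | some m =>
          have hm := ansAF_pos ys m ha
          simp only [omin, toSent]
          rw [Int.min_def]
          split_ifs <;> omega

-- ===== VERDICT (by name: the statement is the Claim_ definition above) =====
theorem minimumDistance_spec : Claim_equal_minimumDistance := by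
  intro nums _
  unfold Spec_minimumDistance
  rw [A_closed, minimumDistance_alt, (B_inv nums).2]
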